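-- pv_equiv track=rewrite | github.com/navajonki/brain_dump | graveyard/old_chunking/chunking_v2.py | _deduplicate_facts
-- ===== SOURCE A (Python) =====
-- from typing import List, Dict, Any, Optional, Tuple
--
-- def _deduplicate_facts(all_facts: List[str]) -> List[str]:
--     """Deduplicate and merge similar facts"""
--     if not all_facts:
--         return []
--
--     # First, normalize facts for comparison
--     normalized_facts = [fact.lower().strip() for fact in all_facts]
--
--     # Use a set to track which facts we've already processed
--     processed_indices = set()
--     deduplicated_facts = []
--
--     for i, fact in enumerate(all_facts):
--         if i in processed_indices:
--             continue
--
--         processed_indices.add(i)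
--         deduplicated_facts.append(fact)
--
--         # Check for similar facts
--         for j, other_fact in enumerate(all_facts):
--             if i != j and j not in processed_indices:
--                 # Simple similarity check - could be improved
--                 if normalized_facts[i] in normalized_facts[j] or normalized_facts[j] in normalized_facts[i]:
--                     processed_indices.add(j)
--                     # We could merge facts here if needed
--
--     return deduplicated_facts
-- ===== SOURCE B (Python) =====
-- from typing import List
--
-- def _deduplicate_facts(all_facts: List[str]) -> List[str]:
--     """Deduplicate facts by substring containment, keeping first occurrences in order."""
--     kept = []
--     kept_norms = []
--     for fact in all_facts:
--         nf = fact.lower().strip()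
--         if not any(k in nf or nf in k for k in kept_norms):
--             kept.append(fact)
--             kept_norms.append(nf)
--     return kept
-- ===== Notes on version B (the rewrite author's own statement) =====
-- stated objective: simpler
-- what changed: Replaces A's processed-index set with forward-marking (inner scan over all n facts for every kept fact) by a single in-order pass that keeps a survivor list of normalized forms and drops a fact iff it is substring-similar to an already-kept one.
import Mathlib
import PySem

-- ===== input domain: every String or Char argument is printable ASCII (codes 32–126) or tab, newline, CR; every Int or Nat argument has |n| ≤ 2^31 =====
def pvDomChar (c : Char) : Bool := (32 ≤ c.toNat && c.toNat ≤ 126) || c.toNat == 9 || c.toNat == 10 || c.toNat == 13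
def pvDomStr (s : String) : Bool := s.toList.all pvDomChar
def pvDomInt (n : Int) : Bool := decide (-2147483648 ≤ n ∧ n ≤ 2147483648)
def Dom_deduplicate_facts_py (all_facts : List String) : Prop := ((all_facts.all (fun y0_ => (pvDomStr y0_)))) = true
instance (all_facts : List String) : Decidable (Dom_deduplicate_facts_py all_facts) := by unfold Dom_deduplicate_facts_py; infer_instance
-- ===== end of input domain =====

-- B replaces A's processed-index set and forward-marking with a single in-order pass
-- keeping a survivor list of normalized forms (objective: simpler; same return value).

-- ===== PORT A =====

-- fact.lower().strip()
def pvNorm (s : String) : String := PySem.Str.strip (PySem.Str.lower s)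

-- A's inner loop: "for j, other_fact in enumerate(all_facts): …" — it reads only
-- normalized_facts[j], so we enumerate the normalized list (same length; q.2 = normalized_facts[j])
def pvMarkSimilar (i : Int) (ni : String) (normalized_facts : List String)
    (processed : PySem.Set Int) : PySem.Set Int :=
  (PySem.List.enumerate normalized_facts).foldl
    (fun pr q =>
      if i ≠ q.1 ∧ pr.contains q.1 = false ∧
          (PySem.Str.isIn ni q.2 || PySem.Str.isIn q.2 ni) = true
      then pr.add q.1 else pr) processed

-- A's outer-loop body; p = (i, (fact, normalized_facts[i]))
def pvStepA (normalized_facts : List String) (st : PySem.Set Int × List String)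
    (p : Int × (String × String)) : PySem.Set Int × List String :=
  if st.1.contains p.1 = true then st
  else
    (pvMarkSimilar p.1 p.2.2 normalized_facts (st.1.add p.1), st.2 ++ [p.2.1])

def deduplicate_facts_py (all_facts : List String) : List String :=
  if all_facts = [] then []
  else
    let normalized_facts := all_facts.map pvNorm
    ((PySem.List.enumerate (all_facts.zip normalized_facts)).foldl (pvStepA normalized_facts)
      (PySem.Set.ofList [], [])).2

-- ===== PORT B =====

-- body of B's single pass: st = (kept, kept_norms)
def pvStepB (st : List String × List String) (fact : String) : List String × List String :=
  let nf := pvNorm fact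
  if (st.2.any (fun k => PySem.Str.isIn k nf || PySem.Str.isIn nf k)) = false
  then (st.1 ++ [fact], st.2 ++ [nf]) else st

def deduplicate_facts_py_alt (all_facts : List String) : List String :=
  (all_facts.foldl pvStepB ([], [])).1

-- ===== PRECONDITION & SPEC =====
def Spec_deduplicate_facts_py (all_facts : List String) (out : List String) : Prop := out = deduplicate_facts_py_alt all_facts
instance (all_facts : List String) (out : List String) : Decidable (Spec_deduplicate_facts_py all_facts out) := by unfold Spec_deduplicate_facts_py; infer_instance

-- ===== CLAIM (what is proved, stated in full; the proofs are below) =====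
def Claim_equal_deduplicate_facts_py : Prop := ∀ (all_facts : List String), Dom_deduplicate_facts_py all_facts → Spec_deduplicate_facts_py all_facts (deduplicate_facts_py all_facts)

-- ===== LEMMAS AND PROOFS =====

def pvSim (a b : String) : Bool := PySem.Str.isIn a b || PySem.Str.isIn b a

-- B's pass, generalized to precomputed (fact, norm) pairs
def pvBgo (pairs : List (String × String)) (st : List String × List String) :
    List String × List String :=
  pairs.foldl
    (fun st p =>
      if (st.2.any (fun k => pvSim k p.2)) = false
      then (st.1 ++ [p.1], st.2 ++ [p.2]) else st) st

lemma pvB_eq_Bgo (facts : List String) :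
    ∀ st, facts.foldl pvStepB st = pvBgo (facts.zip (facts.map pvNorm)) st := by
  induction facts with
  | nil => intro st; rfl
  | cons f fs ih =>
      intro st
      simp only [List.map_cons, List.zip_cons_cons, pvBgo, List.foldl_cons]
      rw [show (fs.foldl pvStepB (pvStepB st f)) = pvBgo (fs.zip (fs.map pvNorm)) (pvStepB st f) from ih _]
      rfl

-- membership after A's inner marking loop
lemma pvMark_mem (i : Int) (ni : String) (L : List (Int × String)) :
    ∀ (p : PySem.Set Int) (x : Int),
      (x ∈ L.foldl
        (fun pr q =>
          if i ≠ q.1 ∧ pr.contains q.1 = false ∧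
              (PySem.Str.isIn ni q.2 || PySem.Str.isIn q.2 ni) = true
          then pr.add q.1 else pr) p)
      ↔ x ∈ p ∨ ∃ q ∈ L, q.1 = x ∧ i ≠ x ∧ pvSim ni q.2 = true := by
  induction L with
  | nil => intro p x; simp
  | cons q L ih =>
      intro p x
      simp only [List.foldl_cons, ih, List.mem_cons]
      by_cases hc : i ≠ q.1 ∧ p.contains q.1 = false ∧
          (PySem.Str.isIn ni q.2 || PySem.Str.isIn q.2 ni) = true
      · simp only [if_pos hc, PySem.Set.mem_add]
        constructor
        · rintro ((h | rfl) | ⟨r, hr, h2⟩)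
          · exact Or.inl h
          · exact Or.inr ⟨q, Or.inl rfl, rfl, hc.1, by simpa [pvSim] using hc.2.2⟩
          · exact Or.inr ⟨r, Or.inr hr, h2⟩
        · rintro (h | ⟨r, hr, h1, h2, h3⟩)
          · exact Or.inl (Or.inl h)
          · rcases hr with rfl | hr
            · exact Or.inl (Or.inr h1.symm)
            · exact Or.inr ⟨r, hr, h1, h2, h3⟩
      · simp only [if_neg hc]
        constructor
        · rintro (h | ⟨r, hr, h2⟩)
          · exact Or.inl h
          · exact Or.inr ⟨r, Or.inr hr, h2⟩
        · rintro (h | ⟨r, hr, h1, h2, h3⟩)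
          · exact Or.inl h
          · rcases hr with rfl | hr
            · subst h1
              rcases not_and_or.mp hc with hbad | hbad
              · exact absurd h2 hbad
              · rcases not_and_or.mp hbad with h' | h'
                · left
                  have hc2 : p.contains r.1 = true := by
                    cases hcb : p.contains r.1
                    · exact absurd hcb h'
                    · rfl
                  simpa using hc2
                · exact absurd (by simpa [pvSim] using h3) h'
            · exact Or.inr ⟨r, hr, h1, h2, h3⟩

-- membership of a later index t after A's marking pass for kept index k
lemma pvMark_mem_at (norms : List String) (k t : Nat) (ni : String) (processed : PySem.Set Int)
    (ht : t < norms.length) (hkt : k < t) :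
    ((t : Int) ∈ pvMarkSimilar (k : Int) ni norms (processed.add (k : Int)))
      ↔ ((t : Int) ∈ processed ∨ pvSim ni norms[t] = true) := by
  unfold pvMarkSimilar
  rw [pvMark_mem, PySem.Set.mem_add]
  constructor
  · rintro ((hin | heq) | ⟨q, hq, hq1, hq2, hq3⟩)
    · exact Or.inl hin
    · exfalso; omega
    · right
      rw [PySem.List.mem_enumerate_iff] at hq
      obtain ⟨t', ht', rfl⟩ := hq
      have : t' = t := by omega
      subst this
      exact hq3
  · rintro (hin | hs)
    · exact Or.inl (Or.inl hin)
    · right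
      refine ⟨((0 : Int) + t, norms[t]), ?_, by omega, by omega, hs⟩
      rw [PySem.List.mem_enumerate_iff]
      exact ⟨t, ht, rfl⟩

-- main invariant: A's outer fold from index k agrees with B's pass on the remaining pairs
lemma pvOuter (norms : List String) :
    ∀ (rest : List (String × String)) (k : Nat) (processed : PySem.Set Int)
      (dedup bnorms : List String),
      (∀ m (h : m < rest.length), norms[k + m]? = some ((rest.get ⟨m, h⟩).2)) →
      (∀ m (h : m < rest.length),
        (((k : Int) + m ∈ processed) ↔ ∃ ν ∈ bnorms, pvSim ν ((rest.get ⟨m, h⟩).2) = true)) →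
      ((PySem.List.enumerate rest (k : Int)).foldl (pvStepA norms) (processed, dedup)).2
        = (pvBgo rest (dedup, bnorms)).1 := by
  intro rest
  induction rest with
  | nil => intro k processed dedup bnorms _ _; rfl
  | cons p rest ih =>
      intro k processed dedup bnorms H2 HI
      rw [PySem.List.enumerate_cons]
      simp only [List.foldl_cons, pvBgo]
      have hk0 := HI 0 (by simp)
      simp only [Nat.cast_zero, add_zero, List.get] at hk0
      have hcast1 : ((k : Int) + 1) = ((k + 1 : Nat) : Int) := by push_cast; ring
      have H2' : ∀ m (h : m < rest.length),
          norms[(k+1) + m]? = some ((rest.get ⟨m, h⟩).2) := by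
        intro m h
        have h2m := H2 (m+1) (by simpa using Nat.succ_lt_succ h)
        rw [show k + (m+1) = (k+1) + m from by omega] at h2m
        exact h2m
      by_cases hmem : (k : Int) ∈ processed
      · -- A skips p; B's any-check fires, both states unchanged
        have hany : (bnorms.any (fun ν => pvSim ν p.2)) = true := by
          obtain ⟨ν, hν, hs⟩ := hk0.mp hmem
          exact List.any_eq_true.mpr ⟨ν, hν, hs⟩
        rw [show pvStepA norms (processed, dedup) ((k : Int), p) = (processed, dedup) from by
          simp [pvStepA, hmem]]
        have HI' : ∀ m (h : m < rest.length),
            ((((k+1 : Nat) : Int) + m ∈ processed) ↔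
              ∃ ν ∈ bnorms, pvSim ν ((rest.get ⟨m, h⟩).2) = true) := by
          intro m h
          have hm := HI (m+1) (by simpa using Nat.succ_lt_succ h)
          rw [show ((k : Int) + ((m+1 : Nat) : Int)) = ((k+1 : Nat) : Int) + (m : Int) from by
            push_cast; ring] at hm
          exact hm
        rw [hcast1, ih (k+1) processed dedup bnorms H2' HI']
        simp [pvBgo, hany]
      · -- A keeps p and forward-marks; B appends fact and norm
        have hany : (bnorms.any (fun ν => pvSim ν p.2)) = false := by
          rw [List.any_eq_false]
          intro ν hν hs
          exact hmem (hk0.mpr ⟨ν, hν, hs⟩)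
        rw [show pvStepA norms (processed, dedup) ((k : Int), p)
            = (pvMarkSimilar (k : Int) p.2 norms (processed.add (k : Int)), dedup ++ [p.1]) from by
          simp [pvStepA, hmem]]
        have HI' : ∀ m (h : m < rest.length),
            ((((k+1 : Nat) : Int) + m ∈
                pvMarkSimilar (k : Int) p.2 norms (processed.add (k : Int))) ↔
              ∃ ν ∈ bnorms ++ [p.2], pvSim ν ((rest.get ⟨m, h⟩).2) = true) := by
          intro m h
          have hH2 := H2 (m+1) (by simpa using Nat.succ_lt_succ h)
          have hHI := HI (m+1) (by simpa using Nat.succ_lt_succ h)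
          rw [show ((k : Int) + ((m+1 : Nat) : Int)) = (((k + (m+1) : Nat)) : Int) from by
            push_cast; ring] at hHI
          have hlen : k + (m+1) < norms.length := by
            by_contra hge
            rw [List.getElem?_eq_none (by omega)] at hH2
            simp at hH2
          have hval : norms[k + (m+1)]'hlen = ((rest.get ⟨m, h⟩).2) := by
            rw [List.getElem?_eq_getElem hlen] at hH2
            exact Option.some.inj hH2
          rw [show (((k+1 : Nat) : Int) + (m : Int)) = (((k + (m+1) : Nat)) : Int) from by
            push_cast; ring]
          rw [pvMark_mem_at norms k (k + (m+1)) p.2 processed hlen (by omega), hval, hHI]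
          constructor
          · rintro (⟨ν, hν, hs⟩ | hs)
            · exact ⟨ν, List.mem_append.mpr (Or.inl hν), hs⟩
            · exact ⟨p.2, List.mem_append.mpr (Or.inr (List.mem_singleton.mpr rfl)), hs⟩
          · rintro ⟨ν, hν, hs⟩
            rcases List.mem_append.mp hν with hν | hν
            · exact Or.inl ⟨ν, hν, hs⟩
            · rw [List.mem_singleton] at hν; subst hν; exact Or.inr hs
        rw [hcast1, ih (k+1) _ _ _ H2' HI']
        simp [pvBgo, hany]

-- ===== VERDICT (by name: the statement is the Claim_ definition above) =====
theorem deduplicate_facts_py_spec : Claim_equal_deduplicate_facts_py := by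
  unfold Claim_equal_deduplicate_facts_py
  intro all_facts _
  unfold Spec_deduplicate_facts_py deduplicate_facts_py deduplicate_facts_py_alt
  by_cases h : all_facts = []
  · subst h; rfl
  · rw [if_neg h, pvB_eq_Bgo]
    have H2 : ∀ m (hm : m < (all_facts.zip (all_facts.map pvNorm)).length),
        (all_facts.map pvNorm)[0 + m]? =
          some (((all_facts.zip (all_facts.map pvNorm)).get ⟨m, hm⟩).2) := by
      intro m hm
      have hm' : m < all_facts.length := by simpa using hm
      simp [List.getElem_zip, hm', List.get_eq_getElem]
    have HI : ∀ m (hm : m < (all_facts.zip (all_facts.map pvNorm)).length),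
        ((((0 : Nat) : Int) + m ∈ (PySem.Set.ofList ([] : List Int))) ↔
          ∃ ν ∈ ([] : List String),
            pvSim ν (((all_facts.zip (all_facts.map pvNorm)).get ⟨m, hm⟩).2) = true) := by
      intro m hm
      simp [PySem.Set.ofList]
    exact pvOuter (all_facts.map pvNorm) (all_facts.zip (all_facts.map pvNorm)) 0
      (PySem.Set.ofList []) [] [] H2 HI
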